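-- pv_equiv track=rewrite | github.com/cadenwurzbacher/condensed-candidate-filings-data | src/pipeline/office_standardizer.py | _is_safe_match
-- ===== SOURCE A (Python) =====
-- def _is_safe_match(office: str, source: str, target: str) -> bool:
--     """
--     Check if a match is safe (prevents incorrect mappings).
--
--     Args:
--         office: Original office name
--         source: Source pattern from mappings
--         target: Target standardized name
--
--     Returns:
--         True if the match is safe
--     """
--     office_lower = office.lower()
--     source_lower = source.lower()
--
--     # Prevent judicial offices from being mapped to executive offices
--     judicial_keywords = ['judge', 'justice', 'court', 'magistrate', 'orphan']
--     executive_keywords = ['president', 'governor', 'mayor']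
--
--     if any(keyword in office_lower for keyword in judicial_keywords):
--         if any(keyword in target.lower() for keyword in executive_keywords):
--             return False
--
--     # Prevent state offices from being mapped to federal offices
--     state_keywords = ['state', 'county', 'city', 'local']
--     federal_keywords = ['us ', 'united states', 'federal']
--
--     if any(keyword in office_lower for keyword in state_keywords):
--         if any(keyword in target.lower() for keyword in federal_keywords):
--             return False
--
--     # Additional safety checks
--     if 'justice of the peace' in office_lower and 'president' in target.lower():
--         return False
--
--     if 'judge' in office_lower and 'president' in target.lower():
--         return False
--
--     return True
-- ===== SOURCE B (Python) =====
-- # B: the safety rules as a data table driving one uniform pass; the two trailing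
-- # special-case checks of A are omitted because they are subsumed by the
-- # judicial->executive rule ('justice of the peace' contains 'justice'; 'judge' is
-- # itself a judicial keyword, and 'president' is an executive keyword).
--
-- _SAFETY_RULES = [
--     (['judge', 'justice', 'court', 'magistrate', 'orphan'],
--      ['president', 'governor', 'mayor']),
--     (['state', 'county', 'city', 'local'],
--      ['us ', 'united states', 'federal']),
-- ]
--
--
-- def _is_safe_match(office: str, source: str, target: str) -> bool:
--     office_lower = office.lower()
--     target_lower = target.lower()
--     for office_keys, target_keys in _SAFETY_RULES:
--         if any(k in office_lower for k in office_keys) and \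
--            any(k in target_lower for k in target_keys):
--             return False
--     return True
-- ===== Notes on version B (the rewrite author's own statement) =====
-- stated objective: simpler
-- what changed: Replaced the four hand-written if-blocks by a data table of (office-keywords, target-keywords) rules scanned in one uniform loop, dropping the two trailing special-case checks that are subsumed by the judicial-to-executive rule.
import Mathlib
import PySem

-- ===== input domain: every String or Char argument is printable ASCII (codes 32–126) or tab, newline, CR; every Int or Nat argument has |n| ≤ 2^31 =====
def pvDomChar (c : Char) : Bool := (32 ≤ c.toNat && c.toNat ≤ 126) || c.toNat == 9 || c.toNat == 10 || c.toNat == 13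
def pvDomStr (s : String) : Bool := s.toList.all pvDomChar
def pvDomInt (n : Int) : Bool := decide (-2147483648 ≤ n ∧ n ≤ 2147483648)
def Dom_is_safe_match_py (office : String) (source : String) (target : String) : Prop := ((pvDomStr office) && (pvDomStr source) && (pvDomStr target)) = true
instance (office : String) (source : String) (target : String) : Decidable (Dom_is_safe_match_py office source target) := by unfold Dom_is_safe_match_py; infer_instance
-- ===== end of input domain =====

-- B replaces A's four hand-written if-blocks by a rule table scanned in one uniform
-- loop; the two trailing special-case checks are subsumed by the judicial rule.


-- ===== PORT A =====
def is_safe_match_py (office : String) (source : String) (target : String) : Bool :=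
  let office_lower := PySem.Str.lower office
  let _source_lower := PySem.Str.lower source
  let judicial_keywords := ["judge", "justice", "court", "magistrate", "orphan"]
  let executive_keywords := ["president", "governor", "mayor"]
  if judicial_keywords.any (fun k => PySem.Str.isIn k office_lower) &&
     executive_keywords.any (fun k => PySem.Str.isIn k (PySem.Str.lower target)) then
    false
  else
    let state_keywords := ["state", "county", "city", "local"]
    let federal_keywords := ["us ", "united states", "federal"]
    if state_keywords.any (fun k => PySem.Str.isIn k office_lower) &&
       federal_keywords.any (fun k => PySem.Str.isIn k (PySem.Str.lower target)) then
      false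
    else if PySem.Str.isIn "justice of the peace" office_lower &&
            PySem.Str.isIn "president" (PySem.Str.lower target) then
      false
    else if PySem.Str.isIn "judge" office_lower &&
            PySem.Str.isIn "president" (PySem.Str.lower target) then
      false
    else
      true

-- ===== PORT B =====
def pvSafetyRules : List (List String × List String) :=
  [ (["judge", "justice", "court", "magistrate", "orphan"],
     ["president", "governor", "mayor"]),
    (["state", "county", "city", "local"],
     ["us ", "united states", "federal"]) ]

def is_safe_match_py_alt (office : String) (source : String) (target : String) : Bool :=
  let office_lower := PySem.Str.lower office
  let target_lower := PySem.Str.lower target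
  pvSafetyRules.all (fun rule =>
    !(rule.1.any (fun k => PySem.Str.isIn k office_lower) &&
      rule.2.any (fun k => PySem.Str.isIn k target_lower)))

-- ===== PRECONDITION & SPEC =====
def Spec_is_safe_match_py (office : String) (source : String) (target : String) (out : Bool) : Prop := out = is_safe_match_py_alt office source target
instance (office : String) (source : String) (target : String) (out : Bool) : Decidable (Spec_is_safe_match_py office source target out) := by unfold Spec_is_safe_match_py; infer_instance

-- ===== CLAIM (what is proved, stated in full; the proofs are below) =====
def Claim_equal_is_safe_match_py : Prop := ∀ (office : String) (source : String) (target : String), Dom_is_safe_match_py office source target → Spec_is_safe_match_py office source target (is_safe_match_py office source target)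

-- ===== LEMMAS AND PROOFS =====

-- 'justice of the peace' in s implies 'justice' in s
theorem jop_imp_justice (s : String) :
    PySem.Str.isIn "justice of the peace" s = true → PySem.Str.isIn "justice" s = true := by
  intro h
  rw [PySem.Str.isIn_iff_infix] at h ⊢
  exact List.IsInfix.trans ⟨[], " of the peace".toList, by decide⟩ h

-- the if-chain of A versus the conjunction of B, with the extra checks subsumed
theorem chain_eq (X Y e1 e2 : Bool) (h1 : e1 = true → X = true) (h2 : e2 = true → X = true) :
    (if X then false else if Y then false else if e1 then false else if e2 then false else true)
    = (!X && !Y) := by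
  cases X <;> cases Y <;> simp_all

-- ===== VERDICT (by name: the statement is the Claim_ definition above) =====
theorem is_safe_match_py_spec : Claim_equal_is_safe_match_py := by
  intro office source target _
  unfold Spec_is_safe_match_py is_safe_match_py is_safe_match_py_alt pvSafetyRules
  simp only [List.any_cons, List.any_nil, List.all_cons, List.all_nil, Bool.and_true]
  refine chain_eq _ _ _ _ ?_ ?_
  · intro h
    obtain ⟨hj, hp⟩ := Bool.and_eq_true_iff.mp h
    have hju := jop_imp_justice _ hj
    simp at hju hp ⊢
    tauto
  · intro h
    obtain ⟨hj, hp⟩ := Bool.and_eq_true_iff.mp h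
    simp at hj hp ⊢
    tauto
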